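-- pv_equiv track=rewrite | github.com/NipunaMadhushan/HackerRank-Interview-Preparation-Kit | String Manipulation/Alternating Characters.py | alt_characters
-- ===== SOURCE A (Python) =====
-- def alt_characters(s):
--     last = s[0]
--     count = 0
--     for c in s[1:]:
--         if last == c:
--             count += 1
--         else:
--             last = c
--
--     return count
-- ===== SOURCE B (Python) =====
-- def alt_characters(s):
--     # Two-pointer run extraction: scan each maximal run of equal characters
--     # with an inner loop, and delete all but one character of each run.
--     n = len(s)
--     total = 0
--     i = 0
--     while i < n:
--         j = i
--         while j < n and s[j] == s[i]:
--             j += 1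
--         total += (j - i) - 1
--         i = j
--     return total
-- ===== Notes on version B (the rewrite author's own statement) =====
-- stated objective: alternative
-- what changed: Replaced A's single sentinel-pass (running 'last' char, count of equal neighbours) by a nested two-pointer run scanner that extracts each maximal run of equal characters with an inner loop and adds (run length - 1) per run.
-- outside the precondition, e.g. on alt_characters(''): A raises IndexError, B returns 0
-- crash fix: On the empty string A raises IndexError (s[0]); B naturally returns 0. — e.g. on alt_characters(""): A raises IndexError, B returns 0
import Mathlib
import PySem

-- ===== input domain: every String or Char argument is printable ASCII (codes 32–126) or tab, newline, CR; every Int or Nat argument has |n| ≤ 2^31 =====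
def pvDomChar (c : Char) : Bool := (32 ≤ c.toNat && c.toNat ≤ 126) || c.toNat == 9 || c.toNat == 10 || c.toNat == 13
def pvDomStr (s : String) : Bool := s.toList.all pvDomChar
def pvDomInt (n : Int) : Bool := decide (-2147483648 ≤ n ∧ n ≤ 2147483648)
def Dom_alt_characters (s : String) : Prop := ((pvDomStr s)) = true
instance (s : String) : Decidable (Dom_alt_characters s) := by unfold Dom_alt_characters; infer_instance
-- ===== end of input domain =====

-- B replaces A's sentinel pass by a nested two-pointer run scanner (sum of run length - 1 over maximal runs); alternative decomposition, same cost.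


-- ===== PORT A =====
-- last = s[0]; count = 0; for c in s[1:]: if last == c: count += 1 else: last = c; return count
def alt_characters (s : String) : Int :=
  match PySem.Str.pyGet? s 0 with
  | none => 0  -- IndexError on the empty string; excluded by Pre_
  | some last0 =>
    let r := (PySem.List.slice s.toList (some 1) none).foldl
      (fun (st : Char × Int) c => if st.1 == c then (st.1, st.2 + 1) else (c, st.2))
      (last0, 0)
    r.2

-- ===== PORT B =====
-- inner while loop: j = i; while j < n and s[j] == s[i]: j += 1
-- (fuel is a totality guard only: l.length steps always suffice, see innerB_spec below)
def innerB (l : List Char) (c : Char) : Nat → Nat → Nat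
  | 0, j => j
  | fuel + 1, j => if j < l.length ∧ (l.getD j ' ' == c) = true then innerB l c fuel (j + 1) else j

-- outer while loop: while i < n: j = inner; total += (j - i) - 1; i = j  (fuel likewise)
def outerB (l : List Char) : Nat → Nat → Int → Int
  | 0, _, total => total
  | fuel + 1, i, total =>
    if i < l.length then
      outerB l fuel (innerB l (l.getD i ' ') l.length i)
        (total + ((innerB l (l.getD i ' ') l.length i : Int) - (i : Int) - 1))
    else total

def alt_characters_alt (s : String) : Int := outerB s.toList s.toList.length 0 0

-- ===== PRECONDITION & SPEC =====
-- Pre_ excludes only the empty string, on which A raises IndexError (s[0]).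
def Pre_alt_characters (s : String) : Prop := s ≠ ""
instance (s : String) : Decidable (Pre_alt_characters s) := by unfold Pre_alt_characters; infer_instance
def pvWitness_alt_characters : String := "abba"

-- On the empty string A raises IndexError (s[0]); B naturally returns 0.
def Raises_alt_characters (s : String) : Prop := s = ""
instance (s : String) : Decidable (Raises_alt_characters s) := by unfold Raises_alt_characters; infer_instance
def pvRaiseWitness_alt_characters : String := ""
def pvRaiseWitnessOut_alt_characters : Int := 0

def Spec_alt_characters (s : String) (out : Int) : Prop := out = alt_characters_alt s
instance (s : String) (out : Int) : Decidable (Spec_alt_characters s out) := by unfold Spec_alt_characters; infer_instance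

-- ===== CLAIM (what is proved, stated in full; the proofs are below) =====
def Claim_equal_alt_characters : Prop := ∀ (s : String), Dom_alt_characters s → Pre_alt_characters s → Spec_alt_characters s (alt_characters s)
def Claim_raises_alt_characters : Prop := (∀ (s : String), Dom_alt_characters s → Raises_alt_characters s → ¬ Pre_alt_characters s) ∧ (Dom_alt_characters (pvRaiseWitness_alt_characters) ∧ Raises_alt_characters (pvRaiseWitness_alt_characters) ∧ alt_characters_alt (pvRaiseWitness_alt_characters) = pvRaiseWitnessOut_alt_characters)

-- ===== LEMMAS AND PROOFS =====

-- A's loop, as structural recursion: deletions given the current 'last' char.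
def cntA (a : Char) : List Char → Int
  | [] => 0
  | b :: t => if a == b then 1 + cntA a t else cntA b t

lemma foldA_eq_cnt (t : List Char) : ∀ (a : Char) (k : Int),
    (t.foldl (fun (st : Char × Int) c => if st.1 == c then (st.1, st.2 + 1) else (c, st.2)) (a, k)).2
      = k + cntA a t := by
  induction t with
  | nil => intro a k; simp [cntA]
  | cons b t ih =>
    intro a k
    simp only [List.foldl_cons, cntA]
    by_cases h : (a == b) = true
    · rw [if_pos h, if_pos h, ih]; ring
    · rw [if_neg h, if_neg h, ih]

-- length of the maximal leading run of c
def leadEq (c : Char) : List Char → Nat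
  | [] => 0
  | b :: t => if b == c then 1 + leadEq c t else 0

-- cntA restarted on the tail of the remaining list
def cntA' : List Char → Int
  | [] => 0
  | b :: t => cntA b t

lemma drop_cons_of_lt (l : List Char) (j : Nat) (h : j < l.length) :
    l.drop j = l.getD j ' ' :: l.drop (j + 1) := by
  rw [List.drop_eq_getElem_cons h, List.getD_eq_getElem l ' ' h]

lemma innerB_spec (l : List Char) (c : Char) : ∀ (fuel j : Nat), l.length ≤ j + fuel →
    innerB l c fuel j = j + leadEq c (l.drop j) := by
  intro fuel
  induction fuel with
  | zero =>
    intro j hf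
    rw [innerB, List.drop_eq_nil_of_le (by omega), leadEq]
    omega
  | succ fuel ih =>
    intro j hf
    rw [innerB]
    by_cases h : j < l.length ∧ (l.getD j ' ' == c) = true
    · rw [if_pos h, ih (j + 1) (by omega), drop_cons_of_lt l j h.1, leadEq, if_pos h.2]
      omega
    · rw [if_neg h]
      push Not at h
      by_cases hj : j < l.length
      · rw [drop_cons_of_lt l j hj, leadEq, if_neg (h hj)]; omega
      · rw [List.drop_eq_nil_of_le (by omega), leadEq]; omega

lemma cntA_lead (c : Char) (m : List Char) :
    cntA c m = (leadEq c m : Int) + cntA' (m.drop (leadEq c m)) := by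
  induction m generalizing c with
  | nil => simp [cntA, leadEq, cntA']
  | cons b t ih =>
    by_cases h : (b == c) = true
    · have hbc : b = c := beq_iff_eq.mp h
      subst hbc
      rw [cntA, if_pos (by simp), leadEq, if_pos (by simp), ih b]
      push_cast
      have : (1 + leadEq b t) = (leadEq b t) + 1 := by omega
      rw [this, List.drop_succ_cons]
      ring
    · have hcb : (c == b) = false :=
        beq_eq_false_iff_ne.mpr (fun e => h (beq_iff_eq.mpr e.symm))
      rw [cntA, if_neg (by simp [hcb]), leadEq, if_neg (by simp [h])]
      simp [cntA']

lemma outerB_spec (l : List Char) : ∀ (fuel i : Nat) (total : Int), l.length ≤ i + fuel →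
    outerB l fuel i total = total + cntA' (l.drop i) := by
  intro fuel
  induction fuel with
  | zero =>
    intro i total hf
    rw [outerB, List.drop_eq_nil_of_le (by omega)]
    simp [cntA']
  | succ fuel ih =>
    intro i total hf
    rw [outerB]
    by_cases h : i < l.length
    · rw [if_pos h]
      have hin := innerB_spec l (l.getD i ' ') l.length i (by omega)
      rw [drop_cons_of_lt l i h, leadEq, if_pos (by simp)] at hin
      rw [ih _ _ (by omega), hin, drop_cons_of_lt l i h]
      have hdj : l.drop (i + (1 + leadEq (l.getD i ' ') (l.drop (i + 1))))
          = (l.drop (i + 1)).drop (leadEq (l.getD i ' ') (l.drop (i + 1))) := by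
        rw [List.drop_drop]; congr 1; omega
      rw [hdj]
      have hcl := cntA_lead (l.getD i ' ') (l.drop (i + 1))
      rw [cntA']
      push_cast at hin hcl ⊢
      omega
    · rw [if_neg h, List.drop_eq_nil_of_le (by omega)]
      simp [cntA']

-- ===== VERDICT (by name: the statement is the Claim_ definition above) =====
theorem alt_characters_spec : Claim_equal_alt_characters := by
  intro s _ hpre
  unfold Spec_alt_characters alt_characters alt_characters_alt
  have hl : s.toList ≠ [] := by
    intro h; apply hpre; cases s; simp_all
  obtain ⟨a, t, hat⟩ := List.exists_cons_of_ne_nil hl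
  rw [hat]
  have hget : PySem.Str.pyGet? s 0 = some a := by
    rw [PySem.Str.pyGet?_eq, hat]
    exact PySem.List.pyGet?_zero_cons ..
  rw [hget]
  simp only [PySem.List.slice_from_one, List.tail_cons]
  rw [foldA_eq_cnt t a 0, outerB_spec _ _ _ _ (by omega), List.drop_zero]
  simp [cntA']

@[simp]
theorem alt_characters_raises : Claim_raises_alt_characters := by
  unfold Claim_raises_alt_characters
  constructor
  · intro s _ hr hp; exact hp hr
  · refine ⟨by decide, rfl, ?_⟩
    simp [alt_characters_alt, pvRaiseWitness_alt_characters, pvRaiseWitnessOut_alt_characters, outerB]
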